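-- pv_equiv track=rewrite | github.com/kamberasaf/String-Encoding | String.py | group_name
-- ===== SOURCE A (Python) =====
-- def priority():
--     priority = [[i for i in range(33, 48)] + [i for i in range(58, 65)] + [i for i in range(91, 97)] + [124, 125, 126],
--                 [i for i in range(48, 58)],
--                 [i for i in range(65, 91)],
--                 [i for i in range(97, 123)],
--                 [i for i in range(128, 256)],
--                 [i for i in range(32)] + [127]]
--     return priority
--
-- def group_name(str5):
--     gn = []
--     try:
--         for i in str5:
--             if ord(i) in priority()[0]:
--                 gn.append(1)
--                 continue
--             elif ord(i) in priority()[1]: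
--                 gn.append(2)
--                 continue
--             elif ord(i) in priority()[2]:
--                 gn.append(3)
--                 continue
--             gn.append(4)
--         return list(set(gn))
--     except TypeError:
--         pass
-- ===== SOURCE B (Python) =====
-- def group_name(str5):
--     try:
--         codes = {ord(c) for c in str5}
--     except TypeError:
--         return None
--     cat1 = set(range(33, 48)) | set(range(58, 65)) | set(range(91, 97)) | {124, 125, 126}
--     cat2 = set(range(48, 58))
--     cat3 = set(range(65, 91))
--     out = []
--     if codes & cat1:
--         out.append(1)
--     if codes & cat2:
--         out.append(2)
--     if codes & cat3:
--         out.append(3)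
--     if codes - (cat1 | cat2 | cat3):
--         out.append(4)
--     return out
-- ===== Notes on version B (the rewrite author's own statement) =====
-- stated objective: faster
-- what changed: A classifies every character through an if/elif chain that rebuilds and linearly scans the priority() range lists per character and then deduplicates with list(set(gn)); B builds the set of code points once and emits each category code by a single set intersection/difference probe against precomputed category sets, producing the ascending distinct list directly.
import Mathlib
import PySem

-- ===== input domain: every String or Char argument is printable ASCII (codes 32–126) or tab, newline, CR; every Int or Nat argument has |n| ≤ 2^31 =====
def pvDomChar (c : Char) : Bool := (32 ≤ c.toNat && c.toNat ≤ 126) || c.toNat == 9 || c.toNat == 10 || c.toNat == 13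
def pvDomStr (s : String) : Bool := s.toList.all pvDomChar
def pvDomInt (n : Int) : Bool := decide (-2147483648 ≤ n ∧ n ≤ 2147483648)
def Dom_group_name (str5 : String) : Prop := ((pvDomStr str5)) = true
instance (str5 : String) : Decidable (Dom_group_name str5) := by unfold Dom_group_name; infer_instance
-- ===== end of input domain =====

-- B replaces A's per-character if/elif classification (which rescans freshly built range
-- lists for every character) with one code-point set and four category-set probes: simpler, one pass per category.

-- ===== PORT A =====
-- priority() rebuilds this constant list value on every call in Python; transliterated once.
def priorityP : List (List Int) :=
  [PySem.List.pyRange 33 48 1 ++ PySem.List.pyRange 58 65 1 ++ PySem.List.pyRange 91 97 1 ++ [124, 125, 126],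
   PySem.List.pyRange 48 58 1,
   PySem.List.pyRange 65 91 1,
   PySem.List.pyRange 97 123 1,
   PySem.List.pyRange 128 256 1,
   PySem.List.pyRange 0 32 1 ++ [127]]

-- 'list(set(gn))': gn holds only the ints 1..4, for which CPython's set iteration order is
-- ascending, i.e. sorted without key — an order-independent consumption of the set.
-- The try/except TypeError never fires for a str argument, so the function is total here.
def group_name (str5 : String) : List Int :=
  let gn : List Int := str5.toList.foldl (fun gn i =>
    if ((i.toNat : Int)) ∈ priorityP.getD 0 [] then gn ++ [1]
    else if ((i.toNat : Int)) ∈ priorityP.getD 1 [] then gn ++ [2]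
    else if ((i.toNat : Int)) ∈ priorityP.getD 2 [] then gn ++ [3]
    else gn ++ [4]) []
  PySem.List.sorted (PySem.Set.ofList gn) (fun x => x) false

-- ===== PORT B =====
def cat1B : PySem.Set Int :=
  PySem.Set.union (PySem.Set.union (PySem.Set.union
    (PySem.Set.ofList (PySem.List.pyRange 33 48 1)) (PySem.List.pyRange 58 65 1))
    (PySem.List.pyRange 91 97 1)) [124, 125, 126]
def cat2B : PySem.Set Int := PySem.Set.ofList (PySem.List.pyRange 48 58 1)
def cat3B : PySem.Set Int := PySem.Set.ofList (PySem.List.pyRange 65 91 1)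

def group_name_alt (str5 : String) : List Int :=
  let codes : PySem.Set Int := PySem.Set.ofList (str5.toList.map (fun c => (c.toNat : Int)))
  let out : List Int := []
  let out := if PySem.Set.inter codes cat1B ≠ [] then out ++ [1] else out
  let out := if PySem.Set.inter codes cat2B ≠ [] then out ++ [2] else out
  let out := if PySem.Set.inter codes cat3B ≠ [] then out ++ [3] else out
  let out := if PySem.Set.diff codes (PySem.Set.union (PySem.Set.union cat1B cat2B) cat3B) ≠ [] then out ++ [4] else out
  out

-- ===== PRECONDITION & SPEC =====
def Spec_group_name (str5 : String) (out : List Int) : Prop := out = group_name_alt str5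
instance (str5 : String) (out : List Int) : Decidable (Spec_group_name str5 out) := by unfold Spec_group_name; infer_instance

-- ===== CLAIM (what is proved, stated in full; the proofs are below) =====
def Claim_equal_group_name : Prop := ∀ (str5 : String), Dom_group_name str5 → Spec_group_name str5 (group_name str5)

-- ===== LEMMAS AND PROOFS =====

-- the per-character category A's if/elif chain assigns
def catA (c : Char) : Int :=
  if ((c.toNat : Int)) ∈ priorityP.getD 0 [] then 1
  else if ((c.toNat : Int)) ∈ priorityP.getD 1 [] then 2
  else if ((c.toNat : Int)) ∈ priorityP.getD 2 [] then 3
  else 4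

theorem foldl_append_map {α β : Type} (f : α → β) :
    ∀ (l : List α) (g0 : List β), l.foldl (fun acc x => acc ++ [f x]) g0 = g0 ++ l.map f := by
  intro l
  induction l with
  | nil => simp
  | cons x xs ih => intro g0; simp [List.foldl, ih]

-- B's category sets are, as lists, exactly A's priority lists
theorem cat1B_eq : cat1B = priorityP.getD 0 [] := by decide
theorem cat2B_eq : cat2B = priorityP.getD 1 [] := by decide
theorem cat3B_eq : cat3B = priorityP.getD 2 [] := by decide
theorem disj10 : ∀ x ∈ priorityP.getD 1 [], x ∉ priorityP.getD 0 [] := by decide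
theorem disj20 : ∀ x ∈ priorityP.getD 2 [], x ∉ priorityP.getD 0 [] := by decide
theorem disj21 : ∀ x ∈ priorityP.getD 2 [], x ∉ priorityP.getD 1 [] := by decide

theorem catA_eq_one (c : Char) : catA c = 1 ↔ ((c.toNat : Int)) ∈ priorityP.getD 0 [] := by
  unfold catA; split_ifs with h1 h2 h3 <;> simp_all
theorem catA_eq_two (c : Char) : catA c = 2 ↔ ((c.toNat : Int)) ∈ priorityP.getD 1 [] := by
  unfold catA; split_ifs with h1 h2 h3 <;> simp_all <;> (intro h; exact disj10 _ h h1)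
theorem catA_eq_three (c : Char) : catA c = 3 ↔ ((c.toNat : Int)) ∈ priorityP.getD 2 [] := by
  unfold catA; split_ifs with h1 h2 h3 <;> simp_all <;> intro h
  · exact disj20 _ h h1
  · exact disj21 _ h h2
theorem catA_eq_four (c : Char) : catA c = 4 ↔
    (((c.toNat : Int)) ∉ priorityP.getD 0 [] ∧ ((c.toNat : Int)) ∉ priorityP.getD 1 [] ∧
     ((c.toNat : Int)) ∉ priorityP.getD 2 []) := by
  unfold catA; split_ifs with h1 h2 h3 <;> simp_all
theorem catA_range (c : Char) : catA c = 1 ∨ catA c = 2 ∨ catA c = 3 ∨ catA c = 4 := by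
  unfold catA; split_ifs <;> simp

theorem sorted_set_eq (gn : List Int) (hsub : ∀ x ∈ gn, x = 1 ∨ x = 2 ∨ x = 3 ∨ x = 4) :
    PySem.List.sorted (PySem.Set.ofList gn) (fun x => x) false =
      ((if 1 ∈ gn then ([1] : List Int) else []) ++ (if 2 ∈ gn then [2] else []) ++
       (if 3 ∈ gn then [3] else []) ++ (if 4 ∈ gn then [4] else [])) := by
  apply PySem.List.sorted_eq_of_perm_of_pairwise_lt
  · rw [List.perm_ext_iff_of_nodup ?_ (PySem.Set.nodup_ofList gn)]
    · intro a
      simp only [PySem.Set.mem_ofList, List.mem_append, List.mem_ite_nil_right,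
        List.mem_singleton]
      constructor
      · rintro (((⟨hm, rfl⟩ | ⟨hm, rfl⟩) | ⟨hm, rfl⟩) | ⟨hm, rfl⟩) <;> exact hm
      · intro h
        rcases hsub a h with rfl | rfl | rfl | rfl <;> simp [h]
    · split_ifs <;> decide
  · split_ifs <;> decide

theorem inter_ne_nil (codes : List Int) (t : PySem.Set Int) :
    PySem.Set.inter (PySem.Set.ofList codes) t ≠ [] ↔ ∃ x ∈ codes, x ∈ t := by
  constructor
  · intro h
    obtain ⟨x, hx⟩ := List.exists_mem_of_ne_nil _ h
    rw [PySem.Set.mem_inter, PySem.Set.mem_ofList] at hx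
    exact ⟨x, hx.1, hx.2⟩
  · rintro ⟨x, h1, h2⟩ hnil
    have : x ∈ PySem.Set.inter (PySem.Set.ofList codes) t := by
      rw [PySem.Set.mem_inter, PySem.Set.mem_ofList]; exact ⟨h1, h2⟩
    rw [hnil] at this; exact (List.not_mem_nil).elim this

theorem diff_ne_nil (codes : List Int) (t : PySem.Set Int) :
    PySem.Set.diff (PySem.Set.ofList codes) t ≠ [] ↔ ∃ x ∈ codes, x ∉ t := by
  constructor
  · intro h
    obtain ⟨x, hx⟩ := List.exists_mem_of_ne_nil _ h
    rw [PySem.Set.mem_diff, PySem.Set.mem_ofList] at hx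
    exact ⟨x, hx.1, hx.2⟩
  · rintro ⟨x, h1, h2⟩ hnil
    have : x ∈ PySem.Set.diff (PySem.Set.ofList codes) t := by
      rw [PySem.Set.mem_diff, PySem.Set.mem_ofList]; exact ⟨h1, h2⟩
    rw [hnil] at this; exact (List.not_mem_nil).elim this

theorem group_name_eq_alt : ∀ (str5 : String), group_name str5 = group_name_alt str5 := by
  intro str5
  unfold group_name group_name_alt
  set s := str5.toList with hs
  -- A's loop builds the per-character category list
  have hstep : (fun (gn : List Int) (i : Char) =>
      if ((i.toNat : Int)) ∈ priorityP.getD 0 [] then gn ++ [1]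
      else if ((i.toNat : Int)) ∈ priorityP.getD 1 [] then gn ++ [2]
      else if ((i.toNat : Int)) ∈ priorityP.getD 2 [] then gn ++ [3]
      else gn ++ [4]) = (fun gn i => gn ++ [catA i]) := by
    funext gn i; unfold catA; split_ifs <;> rfl
  rw [hstep, foldl_append_map, List.nil_append]
  -- B's four conditions are exactly "category k occurs"
  have h1 : (PySem.Set.inter (PySem.Set.ofList (s.map fun c => ((c.toNat : Int)))) cat1B ≠ []) ↔
      (1 : Int) ∈ s.map catA := by
    rw [inter_ne_nil, cat1B_eq]
    simp only [List.mem_map]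
    constructor
    · rintro ⟨x, ⟨c, hc, rfl⟩, hm⟩; exact ⟨c, hc, (catA_eq_one c).2 hm⟩
    · rintro ⟨c, hc, h⟩; exact ⟨_, ⟨c, hc, rfl⟩, (catA_eq_one c).1 h⟩
  have h2 : (PySem.Set.inter (PySem.Set.ofList (s.map fun c => ((c.toNat : Int)))) cat2B ≠ []) ↔
      (2 : Int) ∈ s.map catA := by
    rw [inter_ne_nil, cat2B_eq]
    simp only [List.mem_map]
    constructor
    · rintro ⟨x, ⟨c, hc, rfl⟩, hm⟩; exact ⟨c, hc, (catA_eq_two c).2 hm⟩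
    · rintro ⟨c, hc, h⟩; exact ⟨_, ⟨c, hc, rfl⟩, (catA_eq_two c).1 h⟩
  have h3 : (PySem.Set.inter (PySem.Set.ofList (s.map fun c => ((c.toNat : Int)))) cat3B ≠ []) ↔
      (3 : Int) ∈ s.map catA := by
    rw [inter_ne_nil, cat3B_eq]
    simp only [List.mem_map]
    constructor
    · rintro ⟨x, ⟨c, hc, rfl⟩, hm⟩; exact ⟨c, hc, (catA_eq_three c).2 hm⟩
    · rintro ⟨c, hc, h⟩; exact ⟨_, ⟨c, hc, rfl⟩, (catA_eq_three c).1 h⟩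
  have h4 : (PySem.Set.diff (PySem.Set.ofList (s.map fun c => ((c.toNat : Int))))
      (PySem.Set.union (PySem.Set.union cat1B cat2B) cat3B) ≠ []) ↔
      (4 : Int) ∈ s.map catA := by
    rw [diff_ne_nil]
    simp only [List.mem_map, PySem.Set.mem_union, cat1B_eq, cat2B_eq, cat3B_eq]
    constructor
    · rintro ⟨x, ⟨c, hc, rfl⟩, hm⟩
      push Not at hm
      exact ⟨c, hc, (catA_eq_four c).2 ⟨hm.1.1, hm.1.2, hm.2⟩⟩
    · rintro ⟨c, hc, h⟩
      obtain ⟨a, b, d⟩ := (catA_eq_four c).1 h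
      exact ⟨_, ⟨c, hc, rfl⟩, by push Not; exact ⟨⟨a, b⟩, d⟩⟩
  rw [sorted_set_eq (s.map catA) (fun x hx => by
    obtain ⟨c, _, rfl⟩ := List.mem_map.1 hx; exact catA_range c)]
  simp only [h1, h2, h3, h4]
  split_ifs <;> simp

-- ===== VERDICT (by name: the statement is the Claim_ definition above) =====
theorem group_name_spec : Claim_equal_group_name := fun str5 _ => group_name_eq_alt str5
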